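-- pv_equiv track=rewrite | github.com/Jungliana/AoC | AoC-2023/day13.py | find_mirror_line
-- ===== SOURCE A (Python) =====
-- def find_mirror_line(rows: list[str]):
--     for i in range(len(rows) - 1):
--         if rows[i] == rows[i+1]:
--             idx1 = i
--             idx2 = i+1
--             while (idx1 >= 0) and (idx2 < len(rows)) and (rows[idx1] == rows[idx2]):
--                 idx1 -= 1
--                 idx2 += 1
--             if (idx1 == -1) or idx2 == (len(rows)):
--                 return i + 1
--     return 0
-- ===== SOURCE B (Python) =====
-- def find_mirror_line(rows: list[str]):
--     n = len(rows)
--     for k in range(1, n):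
--         m = min(k, n - k)
--         if rows[k - m:k] == rows[k:k + m][::-1]:
--             return k
--     return 0
-- ===== Notes on version B (the rewrite author's own statement) =====
-- stated objective: simpler
-- what changed: B checks each candidate split k directly by comparing the slice above the line with the reversed slice below it (one slice comparison per k), instead of A's adjacent-pair precheck followed by a two-pointer expansion while-loop with boundary tests.
import Mathlib
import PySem

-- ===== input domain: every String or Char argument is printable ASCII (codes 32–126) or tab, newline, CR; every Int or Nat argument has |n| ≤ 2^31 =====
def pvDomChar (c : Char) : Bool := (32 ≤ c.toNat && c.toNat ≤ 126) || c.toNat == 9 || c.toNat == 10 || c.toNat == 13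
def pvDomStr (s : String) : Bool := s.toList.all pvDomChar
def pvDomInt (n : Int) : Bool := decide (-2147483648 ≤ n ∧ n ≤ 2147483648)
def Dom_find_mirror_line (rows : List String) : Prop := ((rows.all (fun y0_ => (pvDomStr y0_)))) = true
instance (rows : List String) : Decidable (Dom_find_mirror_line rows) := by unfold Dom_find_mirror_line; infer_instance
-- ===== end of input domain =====

-- B replaces A's adjacent-pair precheck + two-pointer expansion while-loop by a direct per-split
-- slice-vs-reversed-slice comparison (simpler decomposition; same asymptotic cost).


-- ===== PORT A =====
-- the inner 'while (idx1 >= 0) and (idx2 < len(rows)) and (rows[idx1] == rows[idx2])' loop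
def mirrorExpand (rows : List String) (idx1 idx2 : Int) : Int × Int :=
  if h : 0 ≤ idx1 ∧ idx2 < (rows.length : Int) ∧
         PySem.List.pyGet? rows idx1 = PySem.List.pyGet? rows idx2 then
    mirrorExpand rows (idx1 - 1) (idx2 + 1)
  else (idx1, idx2)
termination_by ((rows.length : Int) - idx2).toNat
decreasing_by omega

-- the 'for i in range(len(rows) - 1)' loop; an early 'return i + 1' = stop recursing
def aLoop (rows : List String) : List Int → Int
  | [] => 0
  | i :: rest =>
    if PySem.List.pyGet? rows i = PySem.List.pyGet? rows (i + 1) then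
      let p := mirrorExpand rows i (i + 1)
      if p.1 = -1 ∨ p.2 = (rows.length : Int) then i + 1 else aLoop rows rest
    else aLoop rows rest

def find_mirror_line (rows : List String) : Int :=
  aLoop rows (PySem.List.pyRange 0 ((rows.length : Int) - 1) 1)

-- ===== PORT B =====
-- 'for k in range(1, n)': compare rows[k-m:k] with rows[k:k+m][::-1] ([::-1] ported as List.reverse)
def altLoop (rows : List String) (n : Int) : List Int → Int
  | [] => 0
  | k :: rest =>
    let m := min k (n - k)
    if PySem.List.slice rows (some (k - m)) (some k) =
       (PySem.List.slice rows (some k) (some (k + m))).reverse then k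
    else altLoop rows n rest

def find_mirror_line_alt (rows : List String) : Int :=
  altLoop rows (rows.length : Int) (PySem.List.pyRange 1 (rows.length : Int) 1)

-- ===== PRECONDITION & SPEC =====
def Spec_find_mirror_line (rows : List String) (out : Int) : Prop := out = find_mirror_line_alt rows
instance (rows : List String) (out : Int) : Decidable (Spec_find_mirror_line rows out) := by unfold Spec_find_mirror_line; infer_instance

-- ===== CLAIM (what is proved, stated in full; the proofs are below) =====
def Claim_equal_find_mirror_line : Prop := ∀ (rows : List String), Dom_find_mirror_line rows → Spec_find_mirror_line rows (find_mirror_line rows)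

-- ===== LEMMAS AND PROOFS =====

-- the mathematical mirror predicate both loops' per-candidate tests are shown equivalent to
def Mir (rows : List String) (k : Int) : Prop :=
  ∀ j : Int, 0 ≤ j → 0 ≤ k - 1 - j → k + j < (rows.length : Int) →
    PySem.List.pyGet? rows (k - 1 - j) = PySem.List.pyGet? rows (k + j)

-- A's while loop reaches a boundary iff every in-range mirrored pair agrees
lemma expandW (rows : List String) (a b : Int) (ha : -1 ≤ a) (hb : b ≤ (rows.length : Int)) :
    ((mirrorExpand rows a b).1 = -1 ∨ (mirrorExpand rows a b).2 = (rows.length : Int)) ↔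
    (∀ j : Int, 0 ≤ j → 0 ≤ a - j → b + j < (rows.length : Int) →
      PySem.List.pyGet? rows (a - j) = PySem.List.pyGet? rows (b + j)) := by
  induction a, b using mirrorExpand.induct rows with
  | case1 a b h ih =>
    rw [mirrorExpand, dif_pos h]
    rw [ih (by omega) (by omega)]
    constructor
    · intro H j hj0 hja hjb
      rcases eq_or_lt_of_le hj0 with rfl | hj1
      · simpa using h.2.2
      · have := H (j - 1) (by omega) (by omega) (by omega)
        have e1 : a - 1 - (j - 1) = a - j := by ring
        have e2 : b + 1 + (j - 1) = b + j := by ring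
        rwa [e1, e2] at this
    · intro H j hj0 hja hjb
      have := H (j + 1) (by omega) (by omega) (by omega)
      have e1 : a - (j + 1) = a - 1 - j := by ring
      have e2 : b + (j + 1) = b + 1 + j := by ring
      rwa [e1, e2] at this
  | case2 a b h =>
    rw [mirrorExpand, dif_neg h]
    push Not at h
    by_cases ha0 : 0 ≤ a
    · by_cases hbn : b < (rows.length : Int)
      · have hne := h ha0 hbn
        simp only []
        constructor
        · intro H; rcases H with H | H <;> omega
        · intro H
          exact absurd (by simpa using H 0 le_rfl (by omega) (by omega)) hne
      · have hbe : b = (rows.length : Int) := by omega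
        simp only [hbe]
        constructor
        · intro _ j hj0 hja hjb; omega
        · intro _; right; trivial
    · have hae : a = -1 := by omega
      simp only [hae]
      constructor
      · intro _ j hj0 hja hjb; omega
      · intro _; left; trivial

-- A's per-candidate test (adjacent precheck + boundary) is Mir (i+1)
lemma condA_iff (rows : List String) (i : Int) (h0 : 0 ≤ i) (h1 : i + 1 < (rows.length : Int)) :
    ((PySem.List.pyGet? rows i = PySem.List.pyGet? rows (i + 1)) ∧
      ((mirrorExpand rows i (i + 1)).1 = -1 ∨ (mirrorExpand rows i (i + 1)).2 = (rows.length : Int)))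
    ↔ Mir rows (i + 1) := by
  rw [expandW rows i (i + 1) (by omega) (by omega)]
  unfold Mir
  constructor
  · intro H j hj0 hja hjb
    have := H.2 j hj0 (by omega) (by omega)
    have e1 : i - j = i + 1 - 1 - j := by ring
    rwa [e1] at this
  · intro H
    refine ⟨by simpa using H 0 le_rfl (by omega) (by omega), fun j hj0 hja hjb => ?_⟩
    have := H j hj0 (by omega) (by omega)
    have e1 : i + 1 - 1 - j = i - j := by ring
    rwa [e1] at this

-- the drop/take/reverse core of B's test, in Nat indices
lemma revtake_iff (rows : List String) (kn mn : Nat) (h1 : 1 ≤ kn) (hmk : mn ≤ kn)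
    (hkmn : kn + mn ≤ rows.length) :
    ((rows.drop (kn - mn)).take mn = ((rows.drop kn).take mn).reverse) ↔
    (∀ jn : Nat, (h : jn < mn) →
       rows[kn - 1 - jn]'(by omega) = rows[kn + jn]'(by omega)) := by
  have hL : ((rows.drop (kn - mn)).take mn).length = mn := by
    simp; omega
  have hR : (((rows.drop kn).take mn).reverse).length = mn := by
    simp; omega
  have hmin : min mn (rows.length - kn) = mn := by omega
  constructor
  · intro hEq jn hjn
    have h5 := List.getElem_of_eq hEq (i := mn - 1 - jn) (by omega)
    simp only [List.getElem_take, List.getElem_drop, List.getElem_reverse,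
      List.length_take, List.length_drop, hmin] at h5
    simp only [show kn - mn + (mn - 1 - jn) = kn - 1 - jn from by omega,
      show mn - 1 - (mn - 1 - jn) = jn from by omega] at h5
    exact h5
  · intro H
    apply List.ext_getElem (by omega)
    intro i hi1 hi2
    simp only [List.getElem_take, List.getElem_drop, List.getElem_reverse,
      List.length_take, List.length_drop, hmin]
    have him : i < mn := by omega
    have h6 := H (mn - 1 - i) (by omega)
    simp only [show kn - 1 - (mn - 1 - i) = kn - mn + i from by omega,
      show kn + (mn - 1 - i) = kn + mn - 1 - i from by omega] at h6
    simp only [show kn + (mn - 1 - i) = kn + mn - 1 - i from by omega]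
    exact h6

-- B's per-candidate slice test is Mir k
lemma condB_iff (rows : List String) (k : Int) (h1 : 1 ≤ k) (h2 : k < (rows.length : Int)) :
    (PySem.List.slice rows (some (k - min k ((rows.length : Int) - k))) (some k) =
      (PySem.List.slice rows (some k) (some (k + min k ((rows.length : Int) - k)))).reverse)
    ↔ Mir rows k := by
  obtain ⟨kn, rfl⟩ : ∃ kn : Nat, k = (kn : Int) :=
    ⟨k.toNat, (Int.toNat_of_nonneg (by omega)).symm⟩
  have h1' : 1 ≤ kn := by exact_mod_cast h1
  have h2' : kn < rows.length := by exact_mod_cast h2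
  have hmint : min (kn : Int) ((rows.length : Int) - kn) = ((min kn (rows.length - kn) : Nat) : Int) := by
    omega
  set mn := min kn (rows.length - kn) with hmn
  have e1 : (kn : Int) - (mn : Int) = ((kn - mn : Nat) : Int) := by omega
  have e2 : (kn : Int) + (mn : Int) = ((kn + mn : Nat) : Int) := by push_cast; ring
  rw [hmint, e1, e2, PySem.List.slice_natCast, PySem.List.slice_natCast]
  rw [show kn - (kn - mn) = mn from by omega, show kn + mn - kn = mn from by omega]
  rw [revtake_iff rows kn mn h1' (by omega) (by omega)]
  unfold Mir
  constructor
  · intro H j hj0 hja hjb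
    obtain ⟨jn, rfl⟩ : ∃ jn : Nat, j = (jn : Int) :=
      ⟨j.toNat, (Int.toNat_of_nonneg hj0).symm⟩
    have hjn : jn < mn := by omega
    rw [PySem.List.pyGet?_eq_some_getElem (xs := rows) (i := (kn : Int) - 1 - jn) (by omega) (by omega),
        PySem.List.pyGet?_eq_some_getElem (xs := rows) (i := (kn : Int) + jn) (by omega) (by omega)]
    have ei1 : ((kn : Int) - 1 - jn).toNat = kn - 1 - jn := by omega
    have ei2 : ((kn : Int) + jn).toNat = kn + jn := by omega
    simp only [ei1, ei2]
    exact congrArg some (H jn hjn)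
  · intro H jn hjn
    have h6 := H (jn : Int) (by omega) (by omega) (by omega)
    rw [PySem.List.pyGet?_eq_some_getElem (xs := rows) (i := (kn : Int) - 1 - jn) (by omega) (by omega),
        PySem.List.pyGet?_eq_some_getElem (xs := rows) (i := (kn : Int) + jn) (by omega) (by omega)] at h6
    have ei1 : ((kn : Int) - 1 - jn).toNat = kn - 1 - jn := by omega
    have ei2 : ((kn : Int) + jn).toNat = kn + jn := by omega
    simp only [ei1, ei2] at h6
    exact Option.some.inj h6

-- the two loops agree from any start index a ≥ 0 (A at candidate i returns i+1; B at k = i+1 returns k)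
lemma loopEq (rows : List String) : ∀ (c : Nat) (a : Int), 0 ≤ a →
    (((rows.length : Int) - 1 - a).toNat = c) →
    aLoop rows (PySem.List.pyRange a ((rows.length : Int) - 1) 1) =
      altLoop rows (rows.length : Int) (PySem.List.pyRange (a + 1) (rows.length : Int) 1) := by
  intro c
  induction c with
  | zero =>
    intro a ha hc
    rw [PySem.List.pyRange_one_eq_nil (by omega), PySem.List.pyRange_one_eq_nil (by omega)]
    rfl
  | succ c ih =>
    intro a ha hc
    have hlt : a < (rows.length : Int) - 1 := by omega
    rw [PySem.List.pyRange_one_cons hlt, PySem.List.pyRange_one_cons (show a + 1 < (rows.length : Int) from by omega)]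
    simp only [aLoop, altLoop]
    by_cases hM : Mir rows (a + 1)
    · have hA := (condA_iff rows a ha (by omega)).mpr hM
      have hB := (condB_iff rows (a + 1) (by omega) (by omega)).mpr hM
      rw [if_pos hA.1, if_pos hA.2, if_pos hB]
    · have hB : ¬ (PySem.List.slice rows (some (a + 1 - min (a + 1) ((rows.length : Int) - (a + 1)))) (some (a + 1)) =
          (PySem.List.slice rows (some (a + 1)) (some (a + 1 + min (a + 1) ((rows.length : Int) - (a + 1))))).reverse) :=
        fun h => hM ((condB_iff rows (a + 1) (by omega) (by omega)).mp h)
      rw [if_neg hB]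
      have hrec := ih (a + 1) (by omega) (by omega)
      by_cases hpre : PySem.List.pyGet? rows a = PySem.List.pyGet? rows (a + 1)
      · have hbd : ¬ ((mirrorExpand rows a (a + 1)).1 = -1 ∨
            (mirrorExpand rows a (a + 1)).2 = (rows.length : Int)) :=
          fun h => hM ((condA_iff rows a ha (by omega)).mp ⟨hpre, h⟩)
        rw [if_pos hpre, if_neg hbd]
        exact hrec
      · rw [if_neg hpre]
        exact hrec

-- ===== VERDICT (by name: the statement is the Claim_ definition above) =====
theorem find_mirror_line_spec : Claim_equal_find_mirror_line := by
  intro rows _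
  unfold Spec_find_mirror_line find_mirror_line find_mirror_line_alt
  have := loopEq rows (((rows.length : Int) - 1 - 0).toNat) 0 le_rfl rfl
  simpa using this
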